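-- pv_equiv track=rewrite | github.com/andrefakhoury/usp-bcc-018 | SME0110_ProgMat/proj/T2/source/src.py | time_per_iteration
-- ===== SOURCE A (Python) =====
-- def time_per_iteration(iteration_time=60*1000, step=30*1000, max_time=30*60*1000):
--     '''Generates a list of maximum times for each iteration'''
--     l = []
--     sum = 0
--
--     while sum + iteration_time <= max_time:
--         l.append(iteration_time)
--         sum += iteration_time
--         iteration_time += step
--
--     return l
-- ===== SOURCE B (Python) =====
-- def time_per_iteration(iteration_time=60*1000, step=30*1000, max_time=30*60*1000):
--     '''Generates a list of maximum times for each iteration'''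
--     def total(n):
--         # total time of the first n iterations (arithmetic series)
--         return n * iteration_time + step * n * (n - 1) // 2
--
--     n = 0
--     while total(n + 1) <= max_time:
--         n += 1
--     return [iteration_time + k * step for k in range(n)]
-- ===== Notes on version B (the rewrite author's own statement) =====
-- stated objective: alternative
-- what changed: Replaces the accumulate-while-appending loop (which mutates iteration_time and a running sum and builds the list element by element) by a count-then-generate decomposition: a closed-form arithmetic-series total(n) is used to count how many iterations fit, and the list is then emitted with one comprehension. Pre_ excludes only inputs on which A's while loop never terminates.
import Mathlib
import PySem

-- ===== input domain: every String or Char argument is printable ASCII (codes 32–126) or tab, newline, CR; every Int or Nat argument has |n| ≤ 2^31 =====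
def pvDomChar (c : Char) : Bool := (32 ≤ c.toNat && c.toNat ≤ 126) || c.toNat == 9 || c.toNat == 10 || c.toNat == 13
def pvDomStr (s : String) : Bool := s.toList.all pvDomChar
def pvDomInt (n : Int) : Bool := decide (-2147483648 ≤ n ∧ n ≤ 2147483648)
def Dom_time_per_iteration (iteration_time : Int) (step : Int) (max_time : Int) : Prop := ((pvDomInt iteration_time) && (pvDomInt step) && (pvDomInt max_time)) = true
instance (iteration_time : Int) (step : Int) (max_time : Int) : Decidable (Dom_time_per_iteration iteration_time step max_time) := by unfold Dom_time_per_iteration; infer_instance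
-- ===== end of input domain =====

-- B replaces A's accumulate-while-appending loop by a count-then-generate decomposition:
-- a closed-form arithmetic-series total, a count loop, then one comprehension (same cost).

-- ===== PORT A =====
-- A's while loop, ported with an explicit fuel argument (Lean functions must be total; the
-- Python loop diverges outside Pre_). The fuel 2*(|iteration_time|+|max_time|)+2 is proved
-- sufficient under Pre_ (lemma tpi_loop_run below), so inside Pre_ the port is exact.
def tpiLoop (step max_time : Int) : Nat → Int → Int → List Int → List Int
  | 0, _, _, acc => acc
  | fuel+1, it, sum, acc =>
    if sum + it ≤ max_time then tpiLoop step max_time fuel (it + step) (sum + it) (acc ++ [it])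
    else acc

def time_per_iteration (iteration_time : Int) (step : Int) (max_time : Int) : List Int :=
  tpiLoop step max_time (2 * (iteration_time.natAbs + max_time.natAbs) + 2) iteration_time 0 []

-- ===== PORT B =====
-- total(n) from Source B: n*iteration_time + step*n*(n-1)//2
def tpiTotal (iteration_time step : Int) (n : Int) : Int :=
  n * iteration_time + PySem.Int.floordiv (step * n * (n - 1)) 2

-- Source B's count loop 'while total(n+1) <= max_time: n += 1', with the same fuel totalisation
-- as A's port (Source B has no fuel; the bound is proved sufficient under Pre_ in tpi_count_run).
def tpiCount (iteration_time step max_time : Int) : Nat → Int → Int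
  | 0, n => n
  | fuel+1, n =>
    if tpiTotal iteration_time step (n + 1) ≤ max_time
    then tpiCount iteration_time step max_time fuel (n + 1)
    else n

def time_per_iteration_alt (iteration_time : Int) (step : Int) (max_time : Int) : List Int :=
  let n := tpiCount iteration_time step max_time
    (2 * (iteration_time.natAbs + max_time.natAbs) + 2) 0
  (PySem.List.pyRange 0 n 1).map (fun k => iteration_time + k * step)

-- ===== PRECONDITION & SPEC =====
-- Pre_ is exactly the set of inputs on which Python A (and B) terminates: A returns [] at
-- once when iteration_time > max_time; with step ≥ 0 its loop terminates iff the terms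
-- eventually grow (iteration_time ≥ 1 or step ≥ 1); with step < 0 it terminates iff the
-- prefix sums overshoot max_time at their peak index (iteration_time-1)/(-step)+1 before
-- the terms turn negative. On all other inputs both Pythons loop forever.
def Pre_time_per_iteration (iteration_time : Int) (step : Int) (max_time : Int) : Prop :=
  max_time < iteration_time ∨
  (0 ≤ step ∧ (1 ≤ iteration_time ∨ 1 ≤ step)) ∨
  (step < 0 ∧ 1 ≤ iteration_time ∧
    2 * max_time < 2 * ((iteration_time - 1) / (-step) + 1) * iteration_time
      + step * ((iteration_time - 1) / (-step) + 1) * ((iteration_time - 1) / (-step)))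
instance (iteration_time : Int) (step : Int) (max_time : Int) : Decidable (Pre_time_per_iteration iteration_time step max_time) := by unfold Pre_time_per_iteration; infer_instance

def pvWitness_time_per_iteration : Int × Int × Int := (2, 1, 10)

def Spec_time_per_iteration (iteration_time : Int) (step : Int) (max_time : Int) (out : List Int) : Prop := out = time_per_iteration_alt iteration_time step max_time
instance (iteration_time : Int) (step : Int) (max_time : Int) (out : List Int) : Decidable (Spec_time_per_iteration iteration_time step max_time out) := by unfold Spec_time_per_iteration; infer_instance

-- ===== CLAIM =====
def Claim_equal_time_per_iteration : Prop := ∀ (iteration_time : Int) (step : Int) (max_time : Int), Dom_time_per_iteration iteration_time step max_time → Pre_time_per_iteration iteration_time step max_time → Spec_time_per_iteration iteration_time step max_time (time_per_iteration iteration_time step max_time)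

-- ===== LEMMAS AND PROOFS =====

-- 2 * total(m) has a division-free closed form (m*(m-1) is even).
theorem tpiTotal_two (it st m : Int) : 2 * tpiTotal it st m = 2 * (m * it) + st * m * (m - 1) := by
  obtain ⟨k, hk⟩ : Even (m * (m - 1)) := by
    have := Int.even_mul_succ_self (m - 1)
    simpa [mul_comm] using this
  unfold tpiTotal
  rw [PySem.Int.floordiv_eq_ediv_of_pos (by norm_num : (0:Int) < 2)]
  have h2 : st * m * (m - 1) = 2 * (st * k) := by linear_combination st * hk
  rw [h2, Int.mul_ediv_cancel_left _ (by norm_num : (2:Int) ≠ 0)]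
  ring

theorem tpiTotal_zero (it st : Int) : tpiTotal it st 0 = 0 := by
  have := tpiTotal_two it st 0
  omega

theorem tpiTotal_one (it st : Int) : tpiTotal it st 1 = it := by
  have := tpiTotal_two it st 1
  omega

-- total overshoots max_time at H = 2*(|it|+|mx|)+2 when step ≥ 0 and the terms grow.
theorem tpiTotal_hi (it st mx : Int) (hst : 0 ≤ st) (hgrow : 1 ≤ it ∨ 1 ≤ st) :
    mx < tpiTotal it st (2 * ((it.natAbs : Int) + (mx.natAbs : Int)) + 2) := by
  set A : Int := (it.natAbs : Int) with hA
  set B : Int := (mx.natAbs : Int) with hB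
  set H : Int := 2 * (A + B) + 2 with hH
  have hitA : it ≤ A ∧ -A ≤ it := by constructor <;> omega
  have hmxB : mx ≤ B := by omega
  have hA0 : 0 ≤ A := by omega
  have hB0 : 0 ≤ B := by omega
  have t := tpiTotal_two it st H
  rcases hgrow with hit | hst1
  · have hq : 0 ≤ st * H * (H - 1) :=
      mul_nonneg (mul_nonneg hst (by omega)) (by omega)
    have l1 : H * 1 ≤ H * it := mul_le_mul_of_nonneg_left hit (by omega)
    linarith [t, hq, l1, hmxB, hA0, hB0]
  · have h0 : (0:Int) ≤ H * (H - 1) := mul_nonneg (by omega) (by omega)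
    have hqq : 1 * (H * (H - 1)) ≤ st * (H * (H - 1)) :=
      mul_le_mul_of_nonneg_right hst1 h0
    have l2 : H * (-A) ≤ H * it := mul_le_mul_of_nonneg_left hitA.2 (by omega)
    have l3 : H * (H - 1) = 2 * (H * A) + 2 * (H * B) + H := by rw [hH]; ring
    have l4 : 2 * B ≤ H * B := mul_le_mul_of_nonneg_right (by omega) hB0
    have t' : 2 * tpiTotal it st H = 2 * (H * it) + st * (H * (H - 1)) := by
      rw [t]; ring
    linarith [t', hqq, l2, l3, l4, hmxB, hB0]

-- A's loop, run from the state after k iterations, appends exactly the terms k..M-1, where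
-- all totals up to M fit in max_time and total(M+1) does not.
theorem tpi_loop_run (it st mx M : Int)
    (hall : ∀ j : Int, 1 ≤ j → j ≤ M → tpiTotal it st j ≤ mx)
    (hMs : ¬ tpiTotal it st (M + 1) ≤ mx) :
    ∀ (fuel : Nat) (k : Int) (acc : List Int), 0 ≤ k → k ≤ M → (M - k).toNat < fuel →
      tpiLoop st mx fuel (it + k * st) (tpiTotal it st k) acc
        = acc ++ (PySem.List.pyRange k M 1).map (fun j => it + j * st) := by
  intro fuel
  induction fuel with
  | zero => intro k acc _ _ hf; omega
  | succ f ih =>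
    intro k acc hk0 hkM hf
    have hsucc : tpiTotal it st k + (it + k * st) = tpiTotal it st (k + 1) := by
      have a := tpiTotal_two it st k
      have b := tpiTotal_two it st (k + 1)
      have h2 : 2 * (tpiTotal it st k + (it + k * st)) = 2 * tpiTotal it st (k + 1) := by
        linear_combination a - b
      omega
    rcases eq_or_lt_of_le hkM with rfl | hlt
    · have : ¬ (tpiTotal it st k + (it + k * st) ≤ mx) := by rw [hsucc]; exact hMs
      simp only [tpiLoop, if_neg this]
      rw [PySem.List.pyRange_one_eq_nil (le_refl k)]
      simp
    · have hguard : tpiTotal it st k + (it + k * st) ≤ mx := by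
        rw [hsucc]
        exact hall (k + 1) (by omega) (by omega)
      simp only [tpiLoop, if_pos hguard]
      have hrec := ih (k + 1) (acc ++ [it + k * st]) (by omega) (by omega) (by omega)
      rw [show it + k * st + st = it + (k + 1) * st by ring, hsucc, hrec,
          PySem.List.pyRange_one_cons hlt]
      simp

-- B's count loop, started at k ≤ M, returns exactly M.
theorem tpi_count_run (it st mx M : Int)
    (hall : ∀ j : Int, 1 ≤ j → j ≤ M → tpiTotal it st j ≤ mx)
    (hMs : ¬ tpiTotal it st (M + 1) ≤ mx) :
    ∀ (fuel : Nat) (k : Int), 0 ≤ k → k ≤ M → (M - k).toNat ≤ fuel →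
      tpiCount it st mx fuel k = M := by
  intro fuel
  induction fuel with
  | zero => intro k _ hkM hf; simp only [tpiCount]; omega
  | succ f ih =>
    intro k hk0 hkM hf
    rcases eq_or_lt_of_le hkM with rfl | hlt
    · simp only [tpiCount, if_neg hMs]
    · have hguard : tpiTotal it st (k + 1) ≤ mx := hall (k + 1) (by omega) (by omega)
      simp only [tpiCount, if_pos hguard]
      exact ih (k + 1) (by omega) (by omega) (by omega)

-- ===== VERDICT =====
theorem time_per_iteration_spec : Claim_equal_time_per_iteration := by
  intro it st mx _hdom hpre
  unfold Spec_time_per_iteration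
  set H : Int := 2 * ((it.natAbs : Int) + (mx.natAbs : Int)) + 2 with hHdef
  -- some index b with 1 ≤ b ≤ H at which total overshoots max_time
  have hbr : ∃ b : Int, 1 ≤ b ∧ b ≤ H ∧ ¬ tpiTotal it st b ≤ mx := by
    rcases hpre with h | ⟨hst, hgrow⟩ | ⟨hstneg, hit1, hpeak⟩
    · exact ⟨1, le_refl 1, by omega, by rw [tpiTotal_one]; omega⟩
    · refine ⟨H, by omega, le_refl H, ?_⟩
      have := tpiTotal_hi it st mx hst hgrow
      rw [← hHdef] at this
      omega
    · set q : Int := (it - 1) / (-st) with hqdef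
      have hq0 : 0 ≤ q := by
        rw [hqdef]; exact Int.ediv_nonneg (by omega) (by omega)
      have hqle : q ≤ it - 1 := by
        rw [hqdef]; exact Int.ediv_le_self _ (by omega)
      have e : 2 * tpiTotal it st (q + 1) = 2 * (q + 1) * it + st * (q + 1) * q := by
        have t := tpiTotal_two it st (q + 1)
        linear_combination t
      refine ⟨q + 1, by omega, by omega, by omega⟩
  obtain ⟨b, hb1, hbH, hPb⟩ := hbr
  -- the stopping index M: least n ≥ 0 with total(1+n) > mx
  have hex : ∃ n : Nat, ¬ tpiTotal it st (1 + (n : Int)) ≤ mx := by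
    refine ⟨(b - 1).toNat, ?_⟩
    rwa [show 1 + (((b - 1).toNat : Nat) : Int) = b by omega]
  classical
  set n0 : Nat := Nat.find hex with hn0
  have hQ : ¬ tpiTotal it st (1 + (n0 : Int)) ≤ mx := Nat.find_spec hex
  set M : Int := (n0 : Int) with hMdef
  have hMs : ¬ tpiTotal it st (M + 1) ≤ mx := by
    rwa [show M + 1 = 1 + (n0 : Int) by omega]
  have hall : ∀ j : Int, 1 ≤ j → j ≤ M → tpiTotal it st j ≤ mx := by
    intro j hj1 hjM
    have := Nat.find_min hex (m := (j - 1).toNat) (by omega)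
    rw [not_not] at this
    rwa [show 1 + (((j - 1).toNat : Nat) : Int) = j by omega] at this
  have hM0 : 0 ≤ M := by omega
  have hMH : M < H := by
    have : n0 ≤ (b - 1).toNat := Nat.find_min' hex (by
      rwa [show 1 + (((b - 1).toNat : Nat) : Int) = b by omega])
    omega
  -- A's side
  have hA : time_per_iteration it st mx
      = (PySem.List.pyRange 0 M 1).map (fun j => it + j * st) := by
    unfold time_per_iteration
    have := tpi_loop_run it st mx M hall hMs
      (2 * (it.natAbs + mx.natAbs) + 2) 0 [] (le_refl 0) (by omega) (by omega)
    simpa [tpiTotal_zero] using this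
  -- B's side
  have hB : time_per_iteration_alt it st mx
      = (PySem.List.pyRange 0 M 1).map (fun k => it + k * st) := by
    unfold time_per_iteration_alt
    have := tpi_count_run it st mx M hall hMs
      (2 * (it.natAbs + mx.natAbs) + 2) 0 (le_refl 0) (by omega) (by omega)
    rw [this]
  rw [hA, hB]
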